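-- pv_equiv track=rewrite | github.com/akatsuyama/LigX | LigX/LigX_core.py | create_split_ind_list
-- ===== SOURCE A (Python) =====
-- def create_split_ind_list(len_list):
--     split_ind_list_1 = [0]
--     split_ind_list_2 = []
--     sum_count = 0
--     for i in len_list:
--         sum_count += i
--         split_ind_list_1.append(sum_count)
--         split_ind_list_2.append(sum_count)
--     split_ind_list_1.pop()
--     return split_ind_list_1,split_ind_list_2
-- ===== SOURCE B (Python) =====
-- def _psums(xs):
--     # divide-and-conquer prefix sums: solve both halves, shift the right half
--     if len(xs) <= 1:
--         return xs[:]
--     m = len(xs) // 2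
--     left = _psums(xs[:m])
--     right = _psums(xs[m:])
--     off = left[-1]
--     return left + [off + r for r in right]
--
-- def create_split_ind_list(len_list):
--     ends = _psums(len_list)
--     starts = [e - x for e, x in zip(ends, len_list)]
--     return starts, ends
-- ===== Notes on version B (the rewrite author's own statement) =====
-- stated objective: alternative
-- what changed: B computes the cumulative ends list by divide-and-conquer (solve both halves, shift the right half by the left half's total) and then recovers the starts list by elementwise subtraction ends[i]-len_list[i], replacing A's single left-to-right running-sum loop with dual appends and a trailing pop().
import Mathlib
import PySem

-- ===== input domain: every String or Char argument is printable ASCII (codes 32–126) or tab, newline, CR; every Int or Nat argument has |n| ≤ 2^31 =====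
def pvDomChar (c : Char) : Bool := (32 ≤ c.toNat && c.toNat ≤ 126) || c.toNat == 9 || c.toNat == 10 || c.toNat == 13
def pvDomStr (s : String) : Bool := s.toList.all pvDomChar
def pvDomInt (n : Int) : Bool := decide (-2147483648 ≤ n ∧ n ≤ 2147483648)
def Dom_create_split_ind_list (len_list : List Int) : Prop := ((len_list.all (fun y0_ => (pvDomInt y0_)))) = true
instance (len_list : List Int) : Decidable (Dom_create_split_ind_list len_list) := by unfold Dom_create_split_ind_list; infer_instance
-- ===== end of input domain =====

-- B replaces A's running-sum loop by divide-and-conquer prefix sums plus subtraction to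
-- recover the starts; an alternative algorithm of similar cost, not claimed faster.

-- ===== PORT A =====
-- state: (split_ind_list_1, split_ind_list_2, sum_count); pop() removes the last
-- element of split_ind_list_1, which is never empty (starts as [0]), so dropLast is exact
def create_split_ind_list (len_list : List Int) : List Int × List Int :=
  let st := len_list.foldl
    (fun (st : List Int × List Int × Int) i =>
      let s := st.2.2 + i
      (st.1 ++ [s], st.2.1 ++ [s], s))
    ([0], [], 0)
  (st.1.dropLast, st.2.1)

-- ===== PORT B =====
-- xs[:m] / xs[m:] with 0 ≤ m ≤ len(xs) are exactly take/drop; left[-1] is exact via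
-- getLast?.getD since left is nonempty there (m ≥ 1); zip truncation matches zipWith
def pvPsums (xs : List Int) : List Int :=
  if h : xs.length ≤ 1 then xs
  else
    let m := xs.length / 2
    let left := pvPsums (xs.take m)
    let right := pvPsums (xs.drop m)
    let off := left.getLast?.getD 0
    left ++ right.map (fun r => off + r)
termination_by xs.length
decreasing_by
  · simp [List.length_take]; omega
  · simp [List.length_drop]; omega

def create_split_ind_list_alt (len_list : List Int) : List Int × List Int :=
  let ends := pvPsums len_list
  let starts := List.zipWith (fun e x => e - x) ends len_list
  (starts, ends)

-- ===== PRECONDITION & SPEC =====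
def Spec_create_split_ind_list (len_list : List Int) (out : List Int × List Int) : Prop := out = create_split_ind_list_alt len_list
instance (len_list : List Int) (out : List Int × List Int) : Decidable (Spec_create_split_ind_list len_list out) := by unfold Spec_create_split_ind_list; infer_instance

-- ===== CLAIM =====
def Claim_equal_create_split_ind_list : Prop := ∀ (len_list : List Int), Dom_create_split_ind_list len_list → Spec_create_split_ind_list len_list (create_split_ind_list len_list)

-- ===== LEMMAS AND PROOFS =====

-- running cumulative sums starting from s
def pvCums (s : Int) : List Int → List Int
  | [] => []
  | x :: xs => (s + x) :: pvCums (s + x) xs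

theorem pvFoldA_eq (l : List Int) : ∀ (p q : List Int) (s : Int),
    l.foldl (fun (st : List Int × List Int × Int) i =>
        let t := st.2.2 + i
        (st.1 ++ [t], st.2.1 ++ [t], t)) (p, q, s)
      = (p ++ pvCums s l, q ++ pvCums s l, s + l.sum) := by
  induction l with
  | nil => intro p q s; simp [pvCums]
  | cons x xs ih =>
      intro p q s
      simp only [List.foldl_cons, ih, pvCums, List.sum_cons, List.append_assoc,
        List.singleton_append]
      ring_nf

theorem pvCums_shift (l : List Int) : ∀ (s t : Int),
    (pvCums t l).map (fun v => s + v) = pvCums (s + t) l := by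
  induction l with
  | nil => intro s t; simp [pvCums]
  | cons x xs ih => intro s t; simp [pvCums, ih, add_assoc]

theorem pvCums_append (a b : List Int) : ∀ (s : Int),
    pvCums s (a ++ b) = pvCums s a ++ pvCums (s + a.sum) b := by
  induction a with
  | nil => intro s; simp [pvCums]
  | cons x xs ih => intro s; simp [pvCums, ih, add_assoc]

theorem pvCums_getLast (l : List Int) (h : l ≠ []) : ∀ (s : Int),
    (pvCums s l).getLast? = some (s + l.sum) := by
  induction l with
  | nil => exact absurd rfl h
  | cons x xs ih =>
      intro s
      cases hxs : xs with
      | nil => simp [pvCums, hxs]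
      | cons y ys =>
          subst hxs
          rw [show pvCums s (x :: y :: ys) = (s + x) :: pvCums (s + x) (y :: ys) from rfl,
            show pvCums (s + x) (y :: ys) = (s + x + y) :: pvCums (s + x + y) ys from rfl,
            List.getLast?_cons_cons,
            ← show pvCums (s + x) (y :: ys) = (s + x + y) :: pvCums (s + x + y) ys from rfl,
            ih (by simp) (s + x)]
          simp only [List.sum_cons, Option.some.injEq]
          ring

theorem pvPsums_eq (xs : List Int) : pvPsums xs = pvCums 0 xs := by
  rw [pvPsums]
  split
  · rename_i h
    match xs, h with
    | [], _ => simp [pvCums]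
    | [x], _ => simp [pvCums]
  · rename_i h
    have h2 : 2 ≤ xs.length := by omega
    have hm : 1 ≤ xs.length / 2 := by omega
    have hL := pvPsums_eq (xs.take (xs.length / 2))
    have hR := pvPsums_eq (xs.drop (xs.length / 2))
    simp only [hL, hR]
    have htne : xs.take (xs.length / 2) ≠ [] := by
      intro hc
      have h := congrArg List.length hc
      rw [List.length_take] at h
      simp only [List.length_nil] at h
      omega
    rw [pvCums_getLast _ htne 0]
    simp only [Option.getD_some, zero_add]
    rw [pvCums_shift]
    conv_rhs => rw [← List.take_append_drop (xs.length / 2) xs]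
    rw [pvCums_append]
    simp
termination_by xs.length
decreasing_by
  · simp [List.length_take]; omega
  · simp [List.length_drop]; omega

theorem pvZip_sub (l : List Int) : ∀ (s : Int),
    List.zipWith (fun e x => e - x) (pvCums s l) l = (s :: pvCums s l).dropLast := by
  induction l with
  | nil => intro s; simp [pvCums]
  | cons x xs ih =>
      intro s
      rw [pvCums, List.zipWith_cons_cons, ih (s + x)]
      have : (s :: (s + x) :: pvCums (s + x) xs).dropLast
          = s :: ((s + x) :: pvCums (s + x) xs).dropLast := by
        rw [List.dropLast_cons_of_ne_nil (by simp)]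
      rw [this]
      simp

-- ===== VERDICT =====
theorem create_split_ind_list_spec : Claim_equal_create_split_ind_list := by
  intro l _
  unfold Spec_create_split_ind_list create_split_ind_list create_split_ind_list_alt
  simp only [pvFoldA_eq, pvPsums_eq, pvZip_sub]
  simp
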